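-- pv_equiv track=rewrite | github.com/HBinhCT/Q-project | hackerrank/Algorithms/Play on benders/solution.py | bendersPlay
-- ===== SOURCE A (Python) =====
-- def bendersPlay(n, paths, queries):
--     #
--     # Write your code here.
--     #
--     from collections import defaultdict
--     from functools import lru_cache, reduce
--     from operator import xor
--
--     def mex(s):
--         i = 0
--         while i in s:
--             i += 1
--         return i
--
--     @lru_cache(maxsize=None)
--     def calculate(x):
--         return mex({calculate(i) for i in graph[x]})
--
--     graph = defaultdict(list)
--     for u, v in paths:
--         graph[u].append(v)
--     res = []
--     for query in queries:
--         res.append('Bumi' if reduce(xor, [calculate(t) for t in query]) else 'Iroh')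
--     return res
-- ===== SOURCE B (Python) =====
-- def bendersPlay(n, paths, queries):
--     def mex(s):
--         i = 0
--         while i in s:
--             i += 1
--         return i
--
--     succ = {}
--     for u, v in paths:
--         succ.setdefault(u, []).append(v)
--
--     # bounded simultaneous fixed-point iteration (Bellman-style value iteration):
--     # len(succ)+1 rounds pin down the Grundy value of every position whose play
--     # is acyclic; positions with no outgoing move stay at 0.
--     g = {x: 0 for x in succ}
--     for _ in range(len(succ) + 1):
--         new = {x: mex({g.get(s, 0) for s in vs}) for x, vs in succ.items()}
--         if new == g:
--             break
--         g = new
--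
--     res = []
--     for query in queries:
--         acc = 0
--         for t in query:
--             acc ^= g.get(t, 0)
--         res.append('Bumi' if acc else 'Iroh')
--     return res
-- ===== Notes on version B (the rewrite author's own statement) =====
-- stated objective: alternative
-- what changed: Replaces the recursive lru_cache Grundy computation with an iterative whole-table fixed-point (Bellman-style value) iteration: a grundy dict over all positions with moves is updated simultaneously for len(succ)+1 rounds (with early exit on convergence), then each query XORs plain table lookups; no recursion at all.
import Mathlib
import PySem

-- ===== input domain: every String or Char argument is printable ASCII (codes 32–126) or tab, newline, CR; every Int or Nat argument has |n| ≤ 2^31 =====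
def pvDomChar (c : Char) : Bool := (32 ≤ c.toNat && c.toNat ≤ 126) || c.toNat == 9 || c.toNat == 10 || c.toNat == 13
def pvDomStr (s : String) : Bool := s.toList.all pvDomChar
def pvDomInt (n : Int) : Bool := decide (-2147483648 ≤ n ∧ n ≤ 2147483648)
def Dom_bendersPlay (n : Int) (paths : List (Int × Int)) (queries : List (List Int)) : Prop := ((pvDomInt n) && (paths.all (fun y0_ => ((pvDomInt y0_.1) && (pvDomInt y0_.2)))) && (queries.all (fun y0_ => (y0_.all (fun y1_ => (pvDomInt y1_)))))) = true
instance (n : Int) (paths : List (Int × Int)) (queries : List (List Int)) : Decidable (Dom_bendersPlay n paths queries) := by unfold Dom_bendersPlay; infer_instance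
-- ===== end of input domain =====

-- B replaces A's recursive memoized Grundy computation by an iterative whole-table
-- fixed-point (value) iteration over the adjacency dict; objective: alternative
-- decomposition (no recursion), not speed.

-- shared helper: both Pythons define the identical `mex` scan, and both build the
-- same successor dict (defaultdict-append in A, setdefault-append in B)
def pyMexGo (s : List Nat) : Nat → Nat → Nat
  | 0, i => i
  | f + 1, i => if i ∈ s then pyMexGo s f (i + 1) else i

def pyMex (s : List Nat) : Nat := pyMexGo s (s.length + 1) 0

def buildAdj (paths : List (Int × Int)) : PySem.Dict Int (List Int) :=
  paths.foldl (fun d p => d.modify p.1 [] (· ++ [p.2])) PySem.Dict.empty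

-- ===== PORT A =====
-- `calculate` totalized with fuel (Python's recursion is unbounded; inside
-- Pre_ the fuel `size+1` is never exhausted, proved below)
def calcA (adj : PySem.Dict Int (List Int)) : Nat → Int → Option Nat
  | 0, _ => none
  | k + 1, x =>
    let ws := (adj.getD x []).map (calcA adj k)
    if ws.all (·.isSome) then some (pyMex (PySem.Set.ofList (ws.map (fun o => o.getD 0)))) else none

def bendersPlay (n : Int) (paths : List (Int × Int)) (queries : List (List Int)) : List String :=
  let graph := buildAdj paths
  let fuel := graph.size + 1
  queries.foldl (fun res query =>
    let vals := query.map (fun t => (calcA graph fuel t).getD 0)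
    -- reduce(xor, vals): raises on an empty query (excluded by Pre_); 0 is a placeholder
    let r := match vals with
      | [] => 0
      | v :: rest => rest.foldl (fun a b => a ^^^ b) v
    res ++ [if r ≠ 0 then "Bumi" else "Iroh"]) []

-- ===== PORT B =====
-- one simultaneous update round: {x: mex({g.get(s, 0) for s in vs}) for x, vs in succ.items()}
-- (keys are succ's keys in order, hence distinct: a legal dict literal)
def stepG (adj : PySem.Dict Int (List Int)) (g : PySem.Dict Int Nat) : PySem.Dict Int Nat :=
  PySem.Dict.mk (adj.items.map (fun p => (p.1, pyMex (PySem.Set.ofList (p.2.map (fun s => g.getD s 0))))))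

-- the rounds loop with its convergence break; every round produces the same key
-- sequence, so Python's order-insensitive dict == coincides with `=` here
def iterG (adj : PySem.Dict Int (List Int)) : Nat → PySem.Dict Int Nat → PySem.Dict Int Nat
  | 0, g => g
  | k + 1, g =>
    let g' := stepG adj g
    if g' = g then g' else iterG adj k g'

def bendersPlay_alt (n : Int) (paths : List (Int × Int)) (queries : List (List Int)) : List String :=
  let succ := buildAdj paths
  let g := iterG succ (succ.size + 1) (PySem.Dict.mk (succ.keys.map (fun x => (x, (0 : Nat)))))
  queries.foldl (fun res query =>
    let acc := query.foldl (fun acc t => acc ^^^ g.getD t 0) 0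
    res ++ [if acc ≠ 0 then "Bumi" else "Iroh"]) []

-- ===== PRECONDITION & SPEC =====
-- bounded-fuel reachability along `paths` edges (fuel bounds the number of moves)
def reachF (paths : List (Int × Int)) : Nat → Int → Int → Bool
  | 0, x, y => x == y
  | f + 1, x, y => x == y || paths.any (fun p => p.1 == x && reachF paths f p.2 y)

-- Pre_ excludes exactly the inputs on which Python A raises: an empty query
-- (reduce over an empty sequence, TypeError) or a queried token from which a
-- cycle of the move graph is reachable (unbounded recursion, RecursionError).
def Pre_bendersPlay (n : Int) (paths : List (Int × Int)) (queries : List (List Int)) : Prop :=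
  (∀ q ∈ queries, q ≠ []) ∧
  ∀ p ∈ paths, (∃ q ∈ queries, ∃ t ∈ q, reachF paths paths.length t p.1 = true) →
    reachF paths paths.length p.2 p.1 = false

instance (n : Int) (paths : List (Int × Int)) (queries : List (List Int)) : Decidable (Pre_bendersPlay n paths queries) := by unfold Pre_bendersPlay; infer_instance

def pvWitness_bendersPlay : Int × (List (Int × Int)) × List (List Int) :=
  (3, [(1, 2), (2, 3)], [[1], [1, 3]])

def Spec_bendersPlay (n : Int) (paths : List (Int × Int)) (queries : List (List Int)) (out : List String) : Prop := out = bendersPlay_alt n paths queries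
instance (n : Int) (paths : List (Int × Int)) (queries : List (List Int)) (out : List String) : Decidable (Spec_bendersPlay n paths queries out) := by unfold Spec_bendersPlay; infer_instance

-- ===== CLAIM (what is proved, stated in full; the proofs are below) =====
def Claim_equal_bendersPlay : Prop := ∀ (n : Int) (paths : List (Int × Int)) (queries : List (List Int)), Dom_bendersPlay n paths queries → Pre_bendersPlay n paths queries → Spec_bendersPlay n paths queries (bendersPlay n paths queries)

-- ===== LEMMAS AND PROOFS =====

-- adjacency dict facts
theorem adj_getD (paths : List (Int × Int)) (x : Int) :
    (buildAdj paths).getD x [] = (paths.filter (fun p => p.1 == x)).map (·.2) := by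
  simp [buildAdj, PySem.Dict.getD_foldl_modify_append, PySem.Dict.getD_empty]

theorem mem_adj {paths : List (Int × Int)} {x s : Int}
    (h : s ∈ (buildAdj paths).getD x []) : (x, s) ∈ paths := by
  rw [adj_getD] at h
  obtain ⟨p, hp, hps⟩ := List.mem_map.1 h
  have hmem := List.mem_filter.1 hp
  have hx : p.1 = x := by simpa using hmem.2
  have : p = (x, s) := by
    cases p; simp_all
  exact this ▸ hmem.1

theorem adj_keys (paths : List (Int × Int)) :
    (buildAdj paths).keys = PySem.Set.ofList (paths.map (·.1)) := by
  simp [buildAdj, PySem.Dict.keys_foldl_modify_key, PySem.Dict.keys_empty,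
    PySem.Set.update_nil_left]

theorem adj_keys_nodup (paths : List (Int × Int)) : (buildAdj paths).keys.Nodup := by
  rw [adj_keys]; exact PySem.Set.nodup_ofList _

theorem adj_size_eq (paths : List (Int × Int)) : (buildAdj paths).size = (buildAdj paths).keys.length := by
  simp [PySem.Dict.size, PySem.Dict.keys]

theorem src_mem_keys {paths : List (Int × Int)} {x s : Int}
    (h : (x, s) ∈ paths) : x ∈ (buildAdj paths).keys := by
  rw [adj_keys, PySem.Set.mem_ofList]
  exact List.mem_map.2 ⟨(x, s), h, rfl⟩

-- chains of moves
def chainL (paths : List (Int × Int)) : List Int → Prop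
  | [] => True
  | [_] => True
  | a :: b :: l => (a, b) ∈ paths ∧ chainL paths (b :: l)

theorem chainL_tail {paths : List (Int × Int)} {a : Int} {l : List Int}
    (h : chainL paths (a :: l)) : chainL paths l := by
  cases l with
  | nil => trivial
  | cons b l2 => exact h.2

theorem chainL_append_left {paths : List (Int × Int)} :
    ∀ (u v : List Int), chainL paths (u ++ v) → chainL paths u
  | [], _, _ => trivial
  | [_], _, _ => trivial
  | a :: b :: u, v, h => ⟨h.1, chainL_append_left (b :: u) v h.2⟩

theorem chainL_append_right {paths : List (Int × Int)} :
    ∀ (u v : List Int), chainL paths (u ++ v) → chainL paths v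
  | [], _, h => h
  | [_], _, h => chainL_tail h
  | _ :: b :: u, v, h => chainL_append_right (b :: u) v h.2

theorem chain_src {paths : List (Int × Int)} :
    ∀ (l : List Int), chainL paths l → ∀ a ∈ l.dropLast, ∃ b, (a, b) ∈ paths
  | [], _, a, ha => by simp at ha
  | [_], _, a, ha => by simp at ha
  | x :: y :: l, h, a, ha => by
      rw [List.dropLast_cons₂] at ha
      rcases List.mem_cons.1 ha with rfl | ha2
      · exact ⟨y, h.1⟩
      · exact chain_src (y :: l) h.2 a ha2

theorem reachF_refl (paths : List (Int × Int)) (f : Nat) (x : Int) : reachF paths f x x = true := by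
  cases f <;> simp [reachF]

theorem chain_reach {paths : List (Int × Int)} :
    ∀ (l : List Int) (x y : Int) (f : Nat), chainL paths (x :: (l ++ [y])) →
      l.length + 1 ≤ f → reachF paths f x y = true := by
  intro l
  induction l with
  | nil =>
    intro x y f h hf
    obtain ⟨f2, rfl⟩ : ∃ f2, f = f2 + 1 := ⟨f - 1, by omega⟩
    simp only [reachF, Bool.or_eq_true, List.any_eq_true]
    right
    exact ⟨(x, y), h.1, by simp [reachF_refl]⟩
  | cons b l2 ih =>
    intro x y f h hf
    obtain ⟨f2, rfl⟩ : ∃ f2, f = f2 + 1 := ⟨f - 1, by omega⟩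
    simp only [reachF, Bool.or_eq_true, List.any_eq_true]
    right
    refine ⟨(x, b), h.1, ?_⟩
    simp only [beq_self_eq_true, Bool.true_and]
    exact ih b y f2 h.2 (by simpa using Nat.le_of_succ_le_succ hf)

theorem calc_none_chain {paths : List (Int × Int)} :
    ∀ (k : Nat) (x : Int), calcA (buildAdj paths) k x = none →
      ∃ ns : List Int, chainL paths (x :: ns) ∧ ns.length = k := by
  intro k
  induction k with
  | zero => intro x _; exact ⟨[], trivial, rfl⟩
  | succ k ih =>
    intro x h
    simp only [calcA] at h
    split at h
    · exact absurd h (by simp)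
    · rename_i hall
      have hex : ∃ s ∈ (buildAdj paths).getD x [], calcA (buildAdj paths) k s = none := by
        by_contra hc
        push Not at hc
        apply hall
        rw [List.all_eq_true]
        intro o ho
        obtain ⟨s, hs, rfl⟩ := List.mem_map.1 ho
        cases hcs : calcA (buildAdj paths) k s with
        | none => exact absurd hcs (hc s hs)
        | some w => simp
      obtain ⟨s, hs, hnone⟩ := hex
      obtain ⟨ns2, hch, hlen⟩ := ih s hnone
      exact ⟨s :: ns2, ⟨mem_adj hs, hch⟩, by simp [hlen]⟩

theorem dup_split : ∀ (l : List Int), ¬ l.Nodup →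
    ∃ (a : Int) (l1 l2 l3 : List Int), l = l1 ++ a :: (l2 ++ a :: l3) := by
  intro l
  induction l with
  | nil => intro h; exact absurd List.nodup_nil h
  | cons x r ih =>
    intro h
    by_cases hx : x ∈ r
    · obtain ⟨s, t, rfl⟩ := List.append_of_mem hx
      exact ⟨x, [], s, t, by simp⟩
    · have hr : ¬ r.Nodup := fun hn => h (List.nodup_cons.2 ⟨hx, hn⟩)
      obtain ⟨a, l1, l2, l3, rfl⟩ := ih hr
      exact ⟨a, x :: l1, l2, l3, by simp⟩

theorem no_chain {paths : List (Int × Int)} {queries : List (List Int)} {n : Int}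
    (hPre : Pre_bendersPlay n paths queries) {q : List Int} {t : Int} {ns : List Int}
    (hq : q ∈ queries) (ht : t ∈ q) (hch : chainL paths (t :: ns))
    (hlen : ns.length = (buildAdj paths).size + 1) : False := by
  have hne : (t :: ns) ≠ [] := by simp
  have hsplit : (t :: ns).dropLast ++ [(t :: ns).getLast hne] = t :: ns :=
    List.dropLast_append_getLast hne
  set l' := (t :: ns).dropLast with hl'
  have hchl : chainL paths l' := by
    refine chainL_append_left l' [(t :: ns).getLast hne] ?_
    rw [hsplit]; exact hch
  have hlenl : l'.length = (buildAdj paths).keys.length + 1 := by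
    rw [← adj_size_eq]
    simp [hl', hlen]
  have hns2 : ∃ ns2, l' = t :: ns2 := by
    cases ns with
    | nil => simp at hlen
    | cons b ns3 => exact ⟨(b :: ns3).dropLast, by simp [hl']⟩
  have hsub : ∀ a ∈ l', a ∈ (buildAdj paths).keys := by
    intro a ha
    obtain ⟨b, hb⟩ := chain_src (t :: ns) hch a (hl' ▸ ha)
    exact src_mem_keys hb
  have hnotnodup : ¬ l'.Nodup := by
    intro hnd
    have h1 : l'.toFinset.card = l'.length := List.toFinset_card_of_nodup hnd
    have h2 : l'.toFinset ⊆ (buildAdj paths).keys.toFinset := by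
      intro a ha
      exact List.mem_toFinset.2 (hsub a (List.mem_toFinset.1 ha))
    have h3 := Finset.card_le_card h2
    have h4 : (buildAdj paths).keys.toFinset.card ≤ (buildAdj paths).keys.length :=
      List.toFinset_card_le _
    omega
  obtain ⟨a, l1, l2, l3, hdec⟩ := dup_split l' hnotnodup
  have hG : (buildAdj paths).keys.length ≤ paths.length := by
    rw [adj_keys]
    calc (PySem.Set.ofList (paths.map (·.1))).length ≤ (paths.map (·.1)).length :=
          PySem.Set.length_ofList_le _
      _ = paths.length := List.length_map ..
  have hlens : l1.length + l2.length + l3.length + 2 = (buildAdj paths).keys.length + 1 := by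
    have h := hlenl
    rw [hdec] at h
    simp [List.length_append] at h
    omega
  -- the queried token t reaches the duplicated node a
  have hreach_ta : reachF paths paths.length t a = true := by
    obtain ⟨ns2, hns2⟩ := hns2
    cases l1 with
    | nil =>
      have hat : a = t := by
        rw [hdec] at hns2
        simp only [List.nil_append, List.cons.injEq] at hns2
        exact hns2.1
      rw [hat]; exact reachF_refl _ _ _
    | cons u l1' =>
      have hu : u = t := by
        rw [hdec] at hns2
        simp only [List.cons_append, List.cons.injEq] at hns2
        exact hns2.1
      have hdec2 : l' = ((u :: l1') ++ [a]) ++ (l2 ++ (a :: l3)) := by rw [hdec]; simp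
      have hch1 : chainL paths ((u :: l1') ++ [a]) :=
        chainL_append_left _ _ (by rw [← hdec2]; exact hchl)
      have hch2 : chainL paths (t :: (l1' ++ [a])) := by rw [← hu]; exact hch1
      have hd : (u :: l1').length = l1'.length + 1 := by simp
      exact chain_reach l1' t a paths.length hch2 (by omega)
  -- the cycle at a contradicts Pre_
  have hcyc : chainL paths (a :: (l2 ++ [a])) := by
    have h1 : chainL paths (a :: (l2 ++ (a :: l3))) := by
      refine chainL_append_right l1 (a :: (l2 ++ (a :: l3))) ?_
      rw [← hdec]; exact hchl
    have h2 : (a :: (l2 ++ (a :: l3))) = (a :: (l2 ++ [a])) ++ l3 := by simp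
    exact chainL_append_left _ _ (h2 ▸ h1)
  have htok : ∃ q' ∈ queries, ∃ t' ∈ q', reachF paths paths.length t' a = true :=
    ⟨q, hq, t, ht, hreach_ta⟩
  cases l2 with
  | nil =>
    have hedge : (a, a) ∈ paths := hcyc.1
    have hfalse := hPre.2 (a, a) hedge htok
    rw [reachF_refl] at hfalse
    simp at hfalse
  | cons c l2' =>
    have hedge : (a, c) ∈ paths := hcyc.1
    have hreach_ca : reachF paths paths.length c a = true := by
      have hch3 : chainL paths (c :: (l2' ++ [a])) := hcyc.2
      have hd : (c :: l2').length = l2'.length + 1 := by simp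
      exact chain_reach l2' c a paths.length hch3 (by omega)
    have hfalse := hPre.2 (a, c) hedge htok
    rw [hreach_ca] at hfalse
    simp at hfalse

theorem calc_some {paths : List (Int × Int)} {queries : List (List Int)} {n : Int}
    (hPre : Pre_bendersPlay n paths queries) {q : List Int} {t : Int}
    (hq : q ∈ queries) (ht : t ∈ q) :
    ∃ v, calcA (buildAdj paths) ((buildAdj paths).size + 1) t = some v := by
  cases h : calcA (buildAdj paths) ((buildAdj paths).size + 1) t with
  | some v => exact ⟨v, rfl⟩
  | none =>
    obtain ⟨ns, hch, hlen⟩ := calc_none_chain _ _ h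
    exact (no_chain hPre hq ht hch hlen).elim

-- B-side: pure iteration, break elimination, table lookups
def iterP (adj : PySem.Dict Int (List Int)) : Nat → PySem.Dict Int Nat → PySem.Dict Int Nat
  | 0, g => g
  | k + 1, g => iterP adj k (stepG adj g)

theorem iterP_succ' (adj : PySem.Dict Int (List Int)) :
    ∀ (k : Nat) (g : PySem.Dict Int Nat), iterP adj (k + 1) g = stepG adj (iterP adj k g) := by
  intro k
  induction k with
  | zero => intro g; rfl
  | succ k ih =>
    intro g
    show iterP adj (k + 1) (stepG adj g) = stepG adj (iterP adj k (stepG adj g))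
    exact ih (stepG adj g)

theorem step_fix {adj : PySem.Dict Int (List Int)} {g : PySem.Dict Int Nat}
    (h : stepG adj g = g) : ∀ k, iterP adj k g = g := by
  intro k
  induction k with
  | zero => rfl
  | succ k ih => rw [iterP_succ', ih, h]

theorem iterG_eq_iterP (adj : PySem.Dict Int (List Int)) :
    ∀ (k : Nat) (g : PySem.Dict Int Nat), iterG adj k g = iterP adj k g := by
  intro k
  induction k with
  | zero => intro g; rfl
  | succ k ih =>
    intro g
    show (if stepG adj g = g then stepG adj g else iterG adj k (stepG adj g)) = iterP adj k (stepG adj g)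
    by_cases h : stepG adj g = g
    · rw [if_pos h, h, step_fix h]
    · rw [if_neg h, ih]

theorem g0_getD (ks : List Int) (x : Int) :
    (PySem.Dict.mk (ks.map (fun k => (k, (0 : Nat))))).getD x 0 = 0 := by
  induction ks with
  | nil =>
    rw [show (PySem.Dict.mk ((([] : List Int)).map (fun k => (k, (0 : Nat))))) = PySem.Dict.empty from rfl]
    exact PySem.Dict.getD_empty ..
  | cons k ks ih =>
    rw [List.map_cons, PySem.Dict.getD_eq_get?_getD, PySem.Dict.get?_mk_cons]
    split
    · rfl
    · rw [← PySem.Dict.getD_eq_get?_getD]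
      exact ih

theorem keys_stepG (adj : PySem.Dict Int (List Int)) (g : PySem.Dict Int Nat) :
    (stepG adj g).keys = adj.keys := by
  show (PySem.Dict.mk _).items.map (·.1) = adj.items.map (·.1)
  simp [List.map_map]

theorem step_getD {adj : PySem.Dict Int (List Int)} (hnd : adj.keys.Nodup)
    (g : PySem.Dict Int Nat) (x : Int) :
    (stepG adj g).getD x 0 = pyMex (PySem.Set.ofList ((adj.getD x []).map (fun s => g.getD s 0))) := by
  have hndstep : (stepG adj g).keys.Nodup := by rw [keys_stepG]; exact hnd
  by_cases hx : x ∈ adj.keys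
  · have hx' : x ∈ adj.items.map (·.1) := hx
    obtain ⟨p, hp, hpx⟩ := List.mem_map.1 hx'
    have hp2 : (x, p.2) ∈ adj.items := by rw [← hpx]; simpa using hp
    have hv : adj.getD x [] = p.2 := PySem.Dict.getD_of_mem_items adj hp2 hnd []
    have hmem2 : (x, pyMex (PySem.Set.ofList (p.2.map (fun s => g.getD s 0)))) ∈ (stepG adj g).items :=
      List.mem_map.2 ⟨p, hp, by rw [← hpx]⟩
    rw [PySem.Dict.getD_of_mem_items _ hmem2 hndstep, hv]
  · have hc1 : (stepG adj g).contains x = false := by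
      rw [Bool.eq_false_iff]
      intro hct
      exact hx (keys_stepG adj g ▸ (PySem.Dict.contains_iff_mem_keys _ _).1 hct)
    have hc2 : adj.contains x = false := by
      rw [Bool.eq_false_iff]
      intro hct
      exact hx ((PySem.Dict.contains_iff_mem_keys _ _).1 hct)
    rw [PySem.Dict.getD_of_not_contains _ 0 hc1, PySem.Dict.getD_of_not_contains _ [] hc2]
    rfl

theorem calc_iter {paths : List (Int × Int)} :
    ∀ (k : Nat) (j : Nat) (x : Int) (v : Nat),
      calcA (buildAdj paths) k x = some v → k ≤ j + 1 →
      (iterP (buildAdj paths) j (PySem.Dict.mk ((buildAdj paths).keys.map (fun x => (x, (0 : Nat)))))).getD x 0 = v := by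
  intro k
  induction k with
  | zero => intro j x v h; exact absurd h (by simp [calcA])
  | succ k ih =>
    intro j x v h hkj
    simp only [calcA] at h
    split at h
    · rename_i hall
      have hv : v = pyMex (PySem.Set.ofList ((((buildAdj paths).getD x []).map (calcA (buildAdj paths) k)).map (fun o => o.getD 0))) :=
        (Option.some.inj h).symm
      cases j with
      | zero =>
        have hk0 : k = 0 := by omega
        subst hk0
        cases hvs : (buildAdj paths).getD x [] with
        | nil =>
          rw [hvs] at hv
          simp only [List.map_nil] at hv
          show (PySem.Dict.mk ((buildAdj paths).keys.map (fun x => (x, (0 : Nat))))).getD x 0 = v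
          rw [g0_getD, hv]
          rfl
        | cons c cs =>
          exfalso
          rw [hvs] at hall
          rw [List.all_eq_true] at hall
          have := hall (calcA (buildAdj paths) 0 c) (by simp)
          simp [calcA] at this
      | succ j =>
        rw [iterP_succ', step_getD (adj_keys_nodup paths)]
        have hmaps : ((buildAdj paths).getD x []).map (fun s => (iterP (buildAdj paths) j (PySem.Dict.mk ((buildAdj paths).keys.map (fun x => (x, (0 : Nat)))))).getD s 0)
            = (((buildAdj paths).getD x []).map (calcA (buildAdj paths) k)).map (fun o => o.getD 0) := by
          rw [List.map_map]
          refine List.map_congr_left ?_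
          intro s hs
          rw [List.all_eq_true] at hall
          have hsome := hall (calcA (buildAdj paths) k s) (List.mem_map.2 ⟨s, hs, rfl⟩)
          obtain ⟨w, hw⟩ := Option.isSome_iff_exists.1 (by simpa using hsome)
          have hit := ih j s w hw (by omega)
          simp only [Function.comp_apply]
          rw [hit, hw]
          rfl
        rw [hmaps, hv]
    · exact absurd h (by simp)

theorem foldl_push_eq_map {α β : Type} (f : α → β) :
    ∀ (l : List α) (acc : List β), l.foldl (fun r x => r ++ [f x]) acc = acc ++ l.map f := by
  intro l
  induction l with
  | nil => intro acc; simp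
  | cons x l ih => intro acc; simp [ih]

-- ===== VERDICT (by name: the statement is the Claim_ definition above) =====
theorem bendersPlay_spec : Claim_equal_bendersPlay := by
  intro n paths queries hDom hPre
  show bendersPlay n paths queries = bendersPlay_alt n paths queries
  simp only [bendersPlay, bendersPlay_alt]
  rw [foldl_push_eq_map, foldl_push_eq_map, List.nil_append, List.nil_append]
  refine List.map_congr_left ?_
  intro q hq
  have hval : ∀ t ∈ q, (calcA (buildAdj paths) ((buildAdj paths).size + 1) t).getD 0
      = (iterG (buildAdj paths) ((buildAdj paths).size + 1)
          (PySem.Dict.mk ((buildAdj paths).keys.map (fun x => (x, (0 : Nat)))))).getD t 0 := by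
    intro t htq
    obtain ⟨v, hv⟩ := calc_some hPre hq htq
    rw [iterG_eq_iterP, hv, calc_iter _ _ t v hv (by omega)]
    rfl
  cases q with
  | nil => exact absurd rfl (hPre.1 [] hq)
  | cons t0 rest =>
    simp only [List.map_cons, List.foldl_cons]
    have hA := hval t0 (List.mem_cons_self ..)
    have hfold : List.foldl (fun a b => a ^^^ b)
          ((calcA (buildAdj paths) ((buildAdj paths).size + 1) t0).getD 0)
          (rest.map (fun t => (calcA (buildAdj paths) ((buildAdj paths).size + 1) t).getD 0))
        = List.foldl (fun acc t => acc ^^^ (iterG (buildAdj paths) ((buildAdj paths).size + 1)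
            (PySem.Dict.mk ((buildAdj paths).keys.map (fun x => (x, (0 : Nat)))))).getD t 0)
          (0 ^^^ (iterG (buildAdj paths) ((buildAdj paths).size + 1)
            (PySem.Dict.mk ((buildAdj paths).keys.map (fun x => (x, (0 : Nat)))))).getD t0 0)
          rest := by
      rw [List.foldl_map, Nat.zero_xor, hA]
      exact PySem.List.foldl_congr_mem rest _ _ _
        (fun acc t ht => by rw [hval t (List.mem_cons_of_mem _ ht)])
    exact if_congr (by rw [hfold]) rfl rfl
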